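-- pv_equiv track=rewrite | github.com/pixelrunner/adventofcode2024 | Day 1/main.py | part2
-- ===== SOURCE A (Python) =====
-- def part2(list1, list2):
--     similarityScore = 0
--     currentNumber = 0
--     currentScore = 0
--
--     # loop through list one work out the similarity score
--     for item in list1:
--         # added this if statement to do less list traversal for known numbers
--         if item == currentNumber:
--             similarityScore += currentScore
--         else:
--             currentNumber = item
--             currentScore = item * list2.count(item)
--             similarityScore += currentScore
--
--     return similarityScore
-- ===== SOURCE B (Python) =====
-- def part2(list1, list2):
--     count1 = {}
--     for x in list1:
--         count1[x] = count1.get(x, 0) + 1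
--     count2 = {}
--     for x in list2:
--         count2[x] = count2.get(x, 0) + 1
--     score = 0
--     for v in count1:
--         score += v * count1[v] * count2.get(v, 0)
--     return score
-- ===== Notes on version B (the rewrite author's own statement) =====
-- stated objective: faster
-- what changed: B builds two frequency dictionaries in one pass each and sums value*count1[value]*count2[value] over the distinct values of list1, replacing A's per-element rescans of list2 (list2.count inside the loop).
import Mathlib
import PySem

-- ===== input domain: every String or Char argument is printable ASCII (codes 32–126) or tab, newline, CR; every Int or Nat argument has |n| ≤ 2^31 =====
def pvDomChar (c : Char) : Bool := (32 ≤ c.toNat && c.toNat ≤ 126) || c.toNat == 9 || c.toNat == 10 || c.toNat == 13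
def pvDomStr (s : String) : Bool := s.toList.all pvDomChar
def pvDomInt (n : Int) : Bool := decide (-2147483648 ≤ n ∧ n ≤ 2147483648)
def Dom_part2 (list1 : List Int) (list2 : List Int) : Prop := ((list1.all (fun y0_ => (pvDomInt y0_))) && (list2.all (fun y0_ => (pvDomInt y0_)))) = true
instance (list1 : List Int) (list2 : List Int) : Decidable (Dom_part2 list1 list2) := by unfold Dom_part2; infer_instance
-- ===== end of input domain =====

-- B replaces A's per-element list2.count rescans with two frequency dictionaries and a sum over list1's distinct values (faster: asymptotic).


-- ===== PORT A =====
-- state: (similarityScore, currentNumber, currentScore)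
def part2 (list1 : List Int) (list2 : List Int) : Int :=
  (list1.foldl (fun (st : Int × Int × Int) item =>
      if item == st.2.1 then (st.1 + st.2.2, st.2.1, st.2.2)
      else (st.1 + item * (PySem.List.count list2 item : Int), item,
            item * (PySem.List.count list2 item : Int)))
    (0, 0, 0)).1

-- ===== PORT B =====
def part2_alt (list1 : List Int) (list2 : List Int) : Int :=
  let count1 := list1.foldl (fun (d : PySem.Dict Int Int) x => d.insert x (d.getD x 0 + 1)) PySem.Dict.empty
  let count2 := list2.foldl (fun (d : PySem.Dict Int Int) x => d.insert x (d.getD x 0 + 1)) PySem.Dict.empty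
  count1.keys.foldl (fun score v => score + v * count1.getD v 0 * count2.getD v 0) 0

-- ===== PRECONDITION & SPEC =====
def Spec_part2 (list1 : List Int) (list2 : List Int) (out : Int) : Prop := out = part2_alt list1 list2
instance (list1 : List Int) (list2 : List Int) (out : Int) : Decidable (Spec_part2 list1 list2 out) := by unfold Spec_part2; infer_instance

-- ===== CLAIM (what is proved, stated in full; the proofs are below) =====
def Claim_equal_part2 : Prop := ∀ (list1 : List Int) (list2 : List Int), Dom_part2 list1 list2 → Spec_part2 list1 list2 (part2 list1 list2)

-- ===== LEMMAS AND PROOFS =====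

-- A's cached-score loop, under the invariant currentScore = currentNumber * count, sums item * list2.count item over list1.
theorem part2_foldl_eq (list2 : List Int) :
    ∀ (l : List Int) (s n c : Int), c = n * (PySem.List.count list2 n : Int) →
      (l.foldl (fun (st : Int × Int × Int) item =>
          if item == st.2.1 then (st.1 + st.2.2, st.2.1, st.2.2)
          else (st.1 + item * (PySem.List.count list2 item : Int), item,
                item * (PySem.List.count list2 item : Int)))
        (s, n, c)).1
      = s + (l.map (fun x => x * (PySem.List.count list2 x : Int))).sum := by
  intro l
  induction l with
  | nil => intro s n c _; simp
  | cons x t ih =>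
    intro s n c hc
    by_cases hx : x = n
    · subst hx
      rw [List.foldl_cons, if_pos (by simp), ih (s + c) x c hc, hc]
      simp [add_assoc]
    · rw [List.foldl_cons, if_neg (by simp [hx]),
          ih (s + x * (PySem.List.count list2 x : Int)) x _ rfl]
      simp [add_assoc]

theorem part2_eq_sum (list1 list2 : List Int) :
    part2 list1 list2 = (list1.map (fun x => x * (PySem.List.count list2 x : Int))).sum := by
  unfold part2
  rw [part2_foldl_eq list2 list1 0 0 0 (by simp)]
  simp

-- Summing v * count1(v) * f(v) over the distinct values of l equals summing x * f(x) over l.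
theorem sum_over_distinct (l : List Int) (f : Int → Int) :
    ((PySem.Set.ofList l).map (fun v => v * (PySem.List.count l v : Int) * f v)).sum
      = (l.map (fun x => x * f x)).sum := by
  rw [← List.sum_toFinset _ (PySem.Set.nodup_ofList l)]
  have ht : (PySem.Set.ofList l).toFinset = l.toFinset := by
    ext x; simp only [List.mem_toFinset, PySem.Set.mem_ofList]
  rw [ht, Finset.sum_list_map_count]
  refine Finset.sum_congr rfl (fun v _ => ?_)
  simp only [nsmul_eq_mul, PySem.List.count_eq]
  ring

theorem part2_alt_eq_sum (list1 list2 : List Int) :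
    part2_alt list1 list2 = (list1.map (fun x => x * (PySem.List.count list2 x : Int))).sum := by
  simp only [part2_alt, PySem.Dict.foldl_insert_getD_add_one_eq_counter]
  rw [PySem.List.foldl_add (g := fun v => v * (PySem.Dict.counter list1).getD v 0 * (PySem.Dict.counter list2).getD v 0),
      PySem.Dict.keys_counter]
  simp only [PySem.Dict.getD_counter, zero_add]
  exact sum_over_distinct list1 (fun v => (PySem.List.count list2 v : Int))

-- ===== VERDICT (by name: the statement is the Claim_ definition above) =====
theorem part2_spec : Claim_equal_part2 := by
  intro list1 list2 _
  unfold Spec_part2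
  rw [part2_eq_sum, part2_alt_eq_sum]
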